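-- pv_equiv track=rewrite | github.com/alaeddinedaly/job-scraper | backend/scrapers/free_email_finder.py | _select_best_recruiting_email
-- ===== SOURCE A (Python) =====
-- from typing import Dict, List, Optional, Tuple
--
-- def _select_best_recruiting_email(emails: List[str], context: str = "") -> Optional[str]:
--     """Select the most likely recruiting/hiring email from list"""
--     recruiting_keywords = [
--         'recruit', 'talent', 'hr', 'hiring', 'career',
--         'job', 'people', 'acquisition', 'staffing'
--     ]
--
--     scored_emails = []
--
--     for email in emails:
--         score = 0
--         email_lower = email.lower()
--
--         # Score based on email prefix
--         for keyword in recruiting_keywords: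
--             if keyword in email_lower:
--                 score += 10
--
--         # Check context around email in HTML
--         if context:
--             context_lower = context.lower()
--             email_index = context_lower.find(email_lower)
--
--             if email_index > -1:
--                 # Get surrounding text (50 chars before and after)
--                 start = max(0, email_index - 50)
--                 end = min(len(context_lower), email_index + len(email_lower) + 50)
--                 surrounding = context_lower[start:end]
--
--                 for keyword in recruiting_keywords:
--                     if keyword in surrounding:
--                         score += 5
--
--         scored_emails.append((score, email))
--
--     # Sort by score
--     scored_emails.sort(reverse=True, key=lambda x: x[0])
--
--     return scored_emails[0][1] if scored_emails and scored_emails[0][0] > 0 else (emails[0] if emails else None)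
-- ===== SOURCE B (Python) =====
-- from typing import List, Optional
--
-- _RECRUITING_KEYWORDS = [
--     'recruit', 'talent', 'hr', 'hiring', 'career',
--     'job', 'people', 'acquisition', 'staffing'
-- ]
--
--
-- def _score(email: str, context_lower: str) -> int:
--     """Keyword hits in the address are worth 10, hits in the 50-char
--     context window around the address are worth 5."""
--     el = email.lower()
--     score = 10 * sum(1 for kw in _RECRUITING_KEYWORDS if kw in el)
--     i = context_lower.find(el)
--     if i >= 0:
--         window = context_lower[max(0, i - 50): i + len(el) + 50]
--         score += 5 * sum(1 for kw in _RECRUITING_KEYWORDS if kw in window)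
--     return score
--
--
-- def _select_best_recruiting_email(emails: List[str], context: str = "") -> Optional[str]:
--     """Select the most likely recruiting/hiring email from list"""
--     if not emails:
--         return None
--     ctx = context.lower()
--     best_email, best_score = emails[0], _score(emails[0], ctx)
--     for email in emails[1:]:
--         s = _score(email, ctx)
--         if s > best_score:
--             best_email, best_score = email, s
--     return best_email
-- ===== Notes on version B (the rewrite author's own statement) =====
-- stated objective: simpler
-- what changed: Replaced A's build-scored-list / stable-reverse-sort / index-0 pipeline with a per-email scoring helper (keyword hits counted once, x10 and x5) and a single linear first-argmax pass; the score>0 fallback to emails[0] disappears because scores are nonnegative, so the first argmax already is emails[0] when every score is 0; dropping the sort and the intermediate list gives a constant-factor speedup.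
import Mathlib
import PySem

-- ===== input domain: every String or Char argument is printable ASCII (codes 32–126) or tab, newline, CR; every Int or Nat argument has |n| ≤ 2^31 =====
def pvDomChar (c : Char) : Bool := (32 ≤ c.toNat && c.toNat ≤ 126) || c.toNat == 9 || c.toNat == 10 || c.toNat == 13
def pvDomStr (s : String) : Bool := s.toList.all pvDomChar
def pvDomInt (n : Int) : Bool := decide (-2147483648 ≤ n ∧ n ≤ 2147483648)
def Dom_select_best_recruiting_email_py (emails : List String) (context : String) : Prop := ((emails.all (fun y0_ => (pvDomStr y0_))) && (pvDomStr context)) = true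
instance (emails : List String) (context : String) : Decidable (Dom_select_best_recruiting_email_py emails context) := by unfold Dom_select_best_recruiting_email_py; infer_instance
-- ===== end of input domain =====

-- B replaces A's build-score-list / stable-reverse-sort / index-0 pipeline by a scoring
-- helper plus one linear first-argmax pass (objective: simpler; same observable behaviour).

-- ===== PORT A =====
def select_best_recruiting_email_py (emails : List String) (context : String) : Option String :=
  let recruiting_keywords : List String :=
    ["recruit", "talent", "hr", "hiring", "career",
     "job", "people", "acquisition", "staffing"]
  let scored_emails : List (Int × String) :=
    emails.foldl (fun acc email =>
      let email_lower := PySem.Str.lower email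
      let score : Int :=
        recruiting_keywords.foldl
          (fun s keyword => if PySem.Str.isIn keyword email_lower then s + 10 else s) 0
      let score : Int :=
        if context ≠ "" then
          let context_lower := PySem.Str.lower context
          let email_index := PySem.Str.find context_lower email_lower
          if email_index > -1 then
            let start := max 0 (email_index - 50)
            let stop := min (PySem.Str.len context_lower)
                            (email_index + PySem.Str.len email_lower + 50)
            let surrounding := PySem.Str.slice context_lower (some start) (some stop)
            recruiting_keywords.foldl
              (fun s keyword => if PySem.Str.isIn keyword surrounding then s + 5 else s) score
          else score
        else score
      acc ++ [(score, email)]) []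
  let sortedl := PySem.List.sorted scored_emails (fun x => x.1) true
  match sortedl with
  | (s, e) :: _ =>
      if s > 0 then some e
      else match emails with
           | e0 :: _ => some e0
           | [] => none
  | [] => match emails with
          | e0 :: _ => some e0
          | [] => none

-- ===== PORT B =====
def pvRecruitingKeywords : List String :=
  ["recruit", "talent", "hr", "hiring", "career",
   "job", "people", "acquisition", "staffing"]

def pvScore (email : String) (context_lower : String) : Int :=
  let el := PySem.Str.lower email
  let score : Int :=
    10 * ((pvRecruitingKeywords.filter (fun kw => PySem.Str.isIn kw el)).length : Int)
  let i := PySem.Str.find context_lower el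
  if i ≥ 0 then
    let window := PySem.Str.slice context_lower
        (some (max 0 (i - 50))) (some (i + PySem.Str.len el + 50))
    score + 5 * ((pvRecruitingKeywords.filter (fun kw => PySem.Str.isIn kw window)).length : Int)
  else score

def select_best_recruiting_email_py_alt (emails : List String) (context : String) : Option String :=
  match emails with
  | [] => none
  | e0 :: rest =>
    let ctx := PySem.Str.lower context
    let best := rest.foldl
      (fun (b : String × Int) email =>
        let s := pvScore email ctx
        if s > b.2 then (email, s) else b)
      (e0, pvScore e0 ctx)
    some best.1

-- ===== PRECONDITION & SPEC =====
def Spec_select_best_recruiting_email_py (emails : List String) (context : String) (out : Option String) : Prop := out = select_best_recruiting_email_py_alt emails context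
instance (emails : List String) (context : String) (out : Option String) : Decidable (Spec_select_best_recruiting_email_py emails context out) := by unfold Spec_select_best_recruiting_email_py; infer_instance

-- ===== CLAIM (what is proved, stated in full; the proofs are below) =====
def Claim_equal_select_best_recruiting_email_py : Prop := ∀ (emails : List String) (context : String), Dom_select_best_recruiting_email_py emails context → Spec_select_best_recruiting_email_py emails context (select_best_recruiting_email_py emails context)

-- ===== LEMMAS AND PROOFS =====

-- A's add-c-per-hit keyword loop is c times the number of hits.
theorem foldl_if_add (kws : List String) (p : String → Bool) (c s0 : Int) :
    kws.foldl (fun s k => if p k then s + c else s) s0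
      = s0 + c * ((kws.filter p).length : Int) := by
  induction kws generalizing s0 with
  | nil => simp
  | cons k t ih =>
    by_cases h : p k
    · simp [h, ih]; ring
    · simp [h, ih]

theorem clampIdx_min (n : Nat) (b : Int) :
    PySem.List.clampIdx n (min (n : Int) b) = PySem.List.clampIdx n b := by
  unfold PySem.List.clampIdx
  split_ifs <;> omega

-- a stop bound clamped to the length in advance does not change the slice
theorem slice_min_stop (s : String) (a b : Int) :
    PySem.Str.slice s (some a) (some (min (PySem.Str.len s) b))
      = PySem.Str.slice s (some a) (some b) := by
  simp [PySem.Str.slice, PySem.Str.len, PySem.List.slice, clampIdx_min]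

-- per-email: A's score computation equals B's scoring helper
theorem scoreA_eq (email context : String) :
    (let email_lower := PySem.Str.lower email
     let score : Int :=
       pvRecruitingKeywords.foldl
         (fun s keyword => if PySem.Str.isIn keyword email_lower then s + 10 else s) 0
     if context ≠ "" then
       let context_lower := PySem.Str.lower context
       let email_index := PySem.Str.find context_lower email_lower
       if email_index > -1 then
         let start := max 0 (email_index - 50)
         let stop := min (PySem.Str.len context_lower)
                         (email_index + PySem.Str.len email_lower + 50)
         let surrounding := PySem.Str.slice context_lower (some start) (some stop)
         pvRecruitingKeywords.foldl
           (fun s keyword => if PySem.Str.isIn keyword surrounding then s + 5 else s) score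
       else score
     else score)
    = pvScore email (PySem.Str.lower context) := by
  unfold pvScore
  dsimp only
  simp only [foldl_if_add, zero_add]
  by_cases hc : context = ""
  · subst hc
    have hl : PySem.Str.lower "" = "" := by decide
    rw [hl, if_neg (by simp)]
    by_cases he : PySem.Str.lower email = ""
    · rw [he]
      decide
    · have hf : PySem.Str.find "" (PySem.Str.lower email) = -1 := by
        rw [PySem.Str.find_eq]
        rw [PySem.Chars.find_eq_neg_one_iff]
        rw [show ("" : String).toList = [] from rfl, List.infix_nil]
        intro h
        exact he (by cases hle : PySem.Str.lower email; simp_all)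
      rw [hf]
      norm_num
  · rw [if_pos hc]
    by_cases hidx : PySem.Str.find (PySem.Str.lower context) (PySem.Str.lower email) ≥ 0
    · rw [if_pos (by omega), if_pos hidx, slice_min_stop]
    · rw [if_neg (by omega), if_neg hidx]

-- A's scored list is a map
theorem foldl_append_map {α β : Type} (g : α → β) (l : List α) (acc : List β) :
    l.foldl (fun a x => a ++ [g x]) acc = acc ++ l.map g := by
  induction l generalizing acc with
  | nil => simp
  | cons x t ih => simp [ih]

-- head of Python's stable reverse sort = running first strict argmax
theorem head_sorted_rev {α : Type} (key : α → Int) (x : α) (l : List α) :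
    (PySem.List.sorted (x :: l) key true).head?
      = some (l.foldl (fun b a => if key b < key a then a else b) x) := by
  induction l using List.reverseRecOn with
  | nil => simp [PySem.List.sorted, PySem.List.insertBy]
  | append_singleton t a ih =>
    have hs : PySem.List.sorted (x :: (t ++ [a])) key true
        = PySem.List.insertBy (fun p q => decide (key q < key p)) a
            (PySem.List.sorted (x :: t) key true) := by
      rw [PySem.List.sorted_rev_eq_foldl_insertBy, PySem.List.sorted_rev_eq_foldl_insertBy,
        show x :: (t ++ [a]) = (x :: t) ++ [a] from rfl, List.foldl_append]
      simp
    rcases hnil : PySem.List.sorted (x :: t) key true with _ | ⟨m, rest⟩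
    · exact absurd hnil (by simp [PySem.List.sorted_eq_nil_iff])
    · rw [hnil] at ih
      have hm : m = t.foldl (fun b a => if key b < key a then a else b) x :=
        Option.some.inj ih
      rw [hs, hnil]
      by_cases h : key m < key a <;>
        simp [PySem.List.insertBy, h, List.foldl_append, ← hm]

-- the fold's score component never decreases; if it ends where it started, nothing changed
theorem fold_best_mono (l : List String) (ctx : String) (b : String × Int) :
    b.2 ≤ (l.foldl (fun b email =>
            let s := pvScore email ctx
            if s > b.2 then (email, s) else b) b).2
    ∧ ((l.foldl (fun b email =>
            let s := pvScore email ctx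
            if s > b.2 then (email, s) else b) b).2 = b.2
        → (l.foldl (fun b email =>
            let s := pvScore email ctx
            if s > b.2 then (email, s) else b) b) = b) := by
  induction l generalizing b with
  | nil => simp
  | cons a t ih =>
    by_cases h : pvScore a ctx > b.2
    · simp only [List.foldl_cons, if_pos h]
      have h2 : pvScore a ctx ≤ (List.foldl
          (fun b email => let s := pvScore email ctx; if s > b.2 then (email, s) else b)
          (a, pvScore a ctx) t).2 := (ih (a, pvScore a ctx)).1
      exact ⟨le_trans (le_of_lt h) h2, fun he => by rw [he] at h2; exact absurd h (not_lt.mpr h2)⟩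
    · simp only [List.foldl_cons, if_neg h]
      exact ih b

theorem pvScore_nonneg (email ctx : String) : 0 ≤ pvScore email ctx := by
  unfold pvScore
  dsimp only
  split <;> positivity

-- the pair fold over (score, email) pairs is B's (email, score) fold with the components swapped
theorem fold_swap (ctx : String) (l : List String) (e0 : String) (s0 : Int) :
    l.foldl (fun (b : Int × String) a =>
        if b.1 < pvScore a ctx then (pvScore a ctx, a) else b) (s0, e0)
      = ((l.foldl (fun (b : String × Int) email =>
            let s := pvScore email ctx
            if s > b.2 then (email, s) else b) (e0, s0)).2,
         (l.foldl (fun (b : String × Int) email =>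
            let s := pvScore email ctx
            if s > b.2 then (email, s) else b) (e0, s0)).1) := by
  induction l generalizing e0 s0 with
  | nil => rfl
  | cons a t ih =>
    by_cases h : s0 < pvScore a ctx
    · simp only [List.foldl_cons, gt_iff_lt, if_pos h, ih]
    · simp only [List.foldl_cons, gt_iff_lt, if_neg h, ih]

-- ===== VERDICT (by name: the statement is the Claim_ definition above) =====
theorem select_best_recruiting_email_py_spec : Claim_equal_select_best_recruiting_email_py := by
  intro emails context _
  unfold Spec_select_best_recruiting_email_py
  cases emails with
  | nil => rfl
  | cons e0 rest =>
    simp only [select_best_recruiting_email_py, select_best_recruiting_email_py_alt]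
    rw [show (["recruit", "talent", "hr", "hiring", "career",
        "job", "people", "acquisition", "staffing"] : List String) = pvRecruitingKeywords from rfl]
    simp only [scoreA_eq, foldl_append_map, List.nil_append, List.map_cons]
    have hh := head_sorted_rev (fun x : Int × String => x.1)
      (pvScore e0 (PySem.Str.lower context), e0)
      (rest.map (fun e => (pvScore e (PySem.Str.lower context), e)))
    rcases hsort : PySem.List.sorted
        ((pvScore e0 (PySem.Str.lower context), e0) ::
          rest.map (fun e => (pvScore e (PySem.Str.lower context), e)))
        (fun x => x.1) true with _ | ⟨⟨sc, e⟩, tl⟩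
    · exact absurd hsort (by simp [PySem.List.sorted_eq_nil_iff])
    · rw [hsort] at hh
      rw [List.foldl_map] at hh
      dsimp only at hh
      rw [fold_swap] at hh
      have hpair := Option.some.inj hh
      have hsc : sc = (rest.foldl (fun (b : String × Int) email =>
            let s := pvScore email (PySem.Str.lower context)
            if s > b.2 then (email, s) else b)
          (e0, pvScore e0 (PySem.Str.lower context))).2 := congrArg Prod.fst hpair
      have he : e = (rest.foldl (fun (b : String × Int) email =>
            let s := pvScore email (PySem.Str.lower context)
            if s > b.2 then (email, s) else b)
          (e0, pvScore e0 (PySem.Str.lower context))).1 := congrArg Prod.snd hpair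
      dsimp only
      by_cases hs : sc > 0
      · rw [if_pos hs, he]
      · rw [if_neg hs]
        have hmono := fold_best_mono rest (PySem.Str.lower context)
          (e0, pvScore e0 (PySem.Str.lower context))
        have h0 := pvScore_nonneg e0 (PySem.Str.lower context)
        dsimp only at hsc hmono
        have heq := hmono.2 (by omega)
        rw [heq]
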